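-- pv_equiv track=rewrite | github.com/abria/TeraStitcher | src/utils/pyscripts/paraconverter.py | sort_start_end
-- ===== SOURCE A (Python) =====
-- def sort_list (len_1, len_2, len_3):
--    """
--    Create a list sorting the indexes along three directions:
--    Input:
--       len_1 = Number of elements of the array for the first index
--       len_2 = Number of elements of the array for the second index
--       len_3 = Number of elements of the array for the third index
--    Output:
--       order = An ordered list containig an a sequence of lists of 3 alements (one for each direction) that identify the position on the local index
--    """
--    order =[]
--    for i in range(0,len_1):
--       for j in range(0,len_2):
--          for k in range(0,len_3):
--             order.append([i,j,k])
--    return order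
--
-- def sort_start_end(start_1, start_2, start_3, end_1, end_2, end_3,size_1, size_2, size_3):
--    """
--    Sort start points and edn point in two lists of elements
--    Input:
--       start_1 = Array containing all the starting indexes for the tiles on the Depth direction
--       start_2 = Array containing all the starting indexes for the tiles on the Height direction
--       start_3 = Array containing all the starting indexes for the tiles on the Width direction
--       end_1 = Array containing all the ending indexes for the tiles on the Depth direction
--       end_2 = Array containing all the ending indexes for the tiles on the Height direction
--       end_3 = Array containing all the ending indexes for the tiles on the Width direction
--       size_1 = Array containing the size of the tile in the Depth direction
--       size_2 = Array containing the size of the tile in the Height direction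
--       size_3 = Array containing the size of the tile in the Width direction
--    Output:
--       order = An ordered list containig an a sequence of lists of 3 alements (one for each direction) that identify the position on the local index
--       start_list = Ordered list of lists of starting points. E.g.: [[width_in[0], height_in[0], depth_in[0]], [width_in[1], height_in[1], depth_in[1]], ... ,[width_in[N], height_in[N], depth_in[N]]]
--       end_list = Ordered list of lists of starting points. E.g.: [[width_fin[0], height_fin[0], depth_in[0]], [width_fin[1], height_fin[1], depth_fin[1]], ... ,[width_fin[N], height_fin[N], depth_fin[N]]]
--       len_arr = Dictionary containing elements like {index:[size_width(i),size_height(i),size_depth(i)],.....}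
--    """
--    len_1 = len(start_1)
--    len_2 = len(start_2)
--    len_3 = len(start_3)
--    #call sort_list
--    order = sort_list (len_1, len_2, len_3)
--    len_list = len(order)
--    start_list = []
--    end_list = []
--    len_arr = {}
--    for i in range(0,len_list):
--       tmp = [start_3[order[i][2]], start_2[order[i][1]],start_1[order[i][0]]]
--       start_list.append(tmp)
--       tmp = [end_3[order[i][2]], end_2[order[i][1]], end_1[order[i][0]]]
--       end_list.append(tmp)
--       tmp = [size_3[order[i][2]], size_2[order[i][1]], size_1[order[i][0]]]
--       len_arr.update({i:tmp})
--    return (order, start_list, end_list, len_arr)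
-- ===== SOURCE B (Python) =====
-- def sort_start_end(start_1, start_2, start_3, end_1, end_2, end_3, size_1, size_2, size_3):
--    # One fused triple-nested pass over the 3D grid with a running counter,
--    # instead of building the order table first and then re-scanning it.
--    order = []
--    start_list = []
--    end_list = []
--    len_arr = {}
--    idx = 0
--    for i in range(len(start_1)):
--       for j in range(len(start_2)):
--          for k in range(len(start_3)):
--             order.append([i, j, k])
--             start_list.append([start_3[k], start_2[j], start_1[i]])
--             end_list.append([end_3[k], end_2[j], end_1[i]])
--             len_arr[idx] = [size_3[k], size_2[j], size_1[i]]
--             idx += 1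
--    return (order, start_list, end_list, len_arr)
-- ===== Notes on version B (the rewrite author's own statement) =====
-- stated objective: simpler
-- what changed: B fuses A's two passes (building the order table with sort_list, then re-scanning it with repeated order[i][...] indexing) into one triple-nested loop with a running counter that emits order, start_list, end_list and len_arr directly.
import Mathlib
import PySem

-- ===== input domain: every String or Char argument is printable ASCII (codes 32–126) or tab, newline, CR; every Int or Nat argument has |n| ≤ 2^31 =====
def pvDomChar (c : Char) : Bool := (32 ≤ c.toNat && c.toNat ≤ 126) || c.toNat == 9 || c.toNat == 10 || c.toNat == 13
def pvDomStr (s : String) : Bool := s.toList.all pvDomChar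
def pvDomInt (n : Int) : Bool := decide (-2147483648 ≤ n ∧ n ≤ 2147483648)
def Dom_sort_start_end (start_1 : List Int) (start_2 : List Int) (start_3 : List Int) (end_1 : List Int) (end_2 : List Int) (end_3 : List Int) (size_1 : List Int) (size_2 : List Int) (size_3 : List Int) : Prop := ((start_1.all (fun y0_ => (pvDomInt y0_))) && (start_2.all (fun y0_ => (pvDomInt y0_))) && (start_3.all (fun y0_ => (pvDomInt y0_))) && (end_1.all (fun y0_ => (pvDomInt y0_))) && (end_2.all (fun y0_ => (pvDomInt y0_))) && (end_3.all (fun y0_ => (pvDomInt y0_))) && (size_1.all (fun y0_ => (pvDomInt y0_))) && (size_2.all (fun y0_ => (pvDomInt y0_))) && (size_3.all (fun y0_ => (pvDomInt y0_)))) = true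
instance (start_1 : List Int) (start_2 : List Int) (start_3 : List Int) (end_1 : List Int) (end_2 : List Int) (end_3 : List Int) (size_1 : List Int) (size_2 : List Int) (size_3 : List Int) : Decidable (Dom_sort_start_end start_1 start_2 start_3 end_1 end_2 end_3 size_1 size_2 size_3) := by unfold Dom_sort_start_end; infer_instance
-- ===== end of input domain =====

-- B fuses A's build-order-table-then-rescan into one triple-nested pass with a running counter (simpler decomposition, same asymptotic cost).


-- ===== PORT A =====
-- helper sort_list: triple nested loop appending [i,j,k]
def pySortList (len_1 len_2 len_3 : Int) : List (List Int) :=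
  (PySem.List.pyRange 0 len_1 1).foldl (fun order i =>
    (PySem.List.pyRange 0 len_2 1).foldl (fun order j =>
      (PySem.List.pyRange 0 len_3 1).foldl (fun order k =>
        order ++ [[i, j, k]]) order) order) []

-- the main loop; start_3[order[i][2]] etc. ported with pyGetD (total form: in range under Pre_, where it is exactly Python's value);
-- len_arr.update({i:tmp}) appends since the keys i = 0,1,2,… are fresh in insertion order (dict → association list convention)
def sort_start_end (start_1 : List Int) (start_2 : List Int) (start_3 : List Int) (end_1 : List Int) (end_2 : List Int) (end_3 : List Int) (size_1 : List Int) (size_2 : List Int) (size_3 : List Int) : List (List Int) × List (List Int) × List (List Int) × (List (Int × List Int)) :=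
  let len_1 : Int := start_1.length
  let len_2 : Int := start_2.length
  let len_3 : Int := start_3.length
  let order := pySortList len_1 len_2 len_3
  let len_list : Int := order.length
  let fin := (PySem.List.pyRange 0 len_list 1).foldl
    (fun (acc : List (List Int) × List (List Int) × List (Int × List Int)) i =>
      (acc.1 ++ [[PySem.List.pyGetD start_3 (PySem.List.pyGetD (PySem.List.pyGetD order i []) 2 0) 0,
                  PySem.List.pyGetD start_2 (PySem.List.pyGetD (PySem.List.pyGetD order i []) 1 0) 0,
                  PySem.List.pyGetD start_1 (PySem.List.pyGetD (PySem.List.pyGetD order i []) 0 0) 0]],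
       acc.2.1 ++ [[PySem.List.pyGetD end_3 (PySem.List.pyGetD (PySem.List.pyGetD order i []) 2 0) 0,
                    PySem.List.pyGetD end_2 (PySem.List.pyGetD (PySem.List.pyGetD order i []) 1 0) 0,
                    PySem.List.pyGetD end_1 (PySem.List.pyGetD (PySem.List.pyGetD order i []) 0 0) 0]],
       acc.2.2 ++ [(i, [PySem.List.pyGetD size_3 (PySem.List.pyGetD (PySem.List.pyGetD order i []) 2 0) 0,
                        PySem.List.pyGetD size_2 (PySem.List.pyGetD (PySem.List.pyGetD order i []) 1 0) 0,
                        PySem.List.pyGetD size_1 (PySem.List.pyGetD (PySem.List.pyGetD order i []) 0 0) 0])]))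
    ([], [], [])
  (order, fin.1, fin.2.1, fin.2.2)

-- ===== PORT B =====
-- one fused triple-nested pass with a running counter idx (len_arr[idx] = … appends: keys 0,1,2,… are fresh)
def sort_start_end_alt (start_1 : List Int) (start_2 : List Int) (start_3 : List Int) (end_1 : List Int) (end_2 : List Int) (end_3 : List Int) (size_1 : List Int) (size_2 : List Int) (size_3 : List Int) : List (List Int) × List (List Int) × List (List Int) × (List (Int × List Int)) :=
  let st := (List.range start_1.length).foldl (fun acc1 (i : Nat) =>
    (List.range start_2.length).foldl (fun acc2 (j : Nat) =>
      (List.range start_3.length).foldl (fun acc3 (k : Nat) =>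
        (acc3.1 ++ [[(i : Int), (j : Int), (k : Int)]],
         acc3.2.1 ++ [[start_3.getD k 0, start_2.getD j 0, start_1.getD i 0]],
         acc3.2.2.1 ++ [[end_3.getD k 0, end_2.getD j 0, end_1.getD i 0]],
         acc3.2.2.2.1 ++ [(acc3.2.2.2.2, [size_3.getD k 0, size_2.getD j 0, size_1.getD i 0])],
         acc3.2.2.2.2 + 1)) acc2) acc1)
    (([] : List (List Int)), ([] : List (List Int)), ([] : List (List Int)), ([] : List (Int × List Int)), (0 : Int))
  (st.1, st.2.1, st.2.2.1, st.2.2.2.1)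

-- ===== PRECONDITION & SPEC =====
-- Pre_ excludes exactly the inputs where Python A raises IndexError: the grid is nonempty and some end_/size_ list is
-- shorter than the corresponding start_ list (B raises there too).
def Pre_sort_start_end (start_1 : List Int) (start_2 : List Int) (start_3 : List Int) (end_1 : List Int) (end_2 : List Int) (end_3 : List Int) (size_1 : List Int) (size_2 : List Int) (size_3 : List Int) : Prop :=
  start_1 = [] ∨ start_2 = [] ∨ start_3 = [] ∨
  (start_1.length ≤ end_1.length ∧ start_2.length ≤ end_2.length ∧ start_3.length ≤ end_3.length ∧
   start_1.length ≤ size_1.length ∧ start_2.length ≤ size_2.length ∧ start_3.length ≤ size_3.length)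
instance (start_1 : List Int) (start_2 : List Int) (start_3 : List Int) (end_1 : List Int) (end_2 : List Int) (end_3 : List Int) (size_1 : List Int) (size_2 : List Int) (size_3 : List Int) : Decidable (Pre_sort_start_end start_1 start_2 start_3 end_1 end_2 end_3 size_1 size_2 size_3) := by unfold Pre_sort_start_end; infer_instance

def pvWitness_sort_start_end : List Int × List Int × List Int × List Int × List Int × List Int × List Int × List Int × List Int :=
  ([0], [1], [2], [10], [11], [12], [5], [6], [7])

def Spec_sort_start_end (start_1 : List Int) (start_2 : List Int) (start_3 : List Int) (end_1 : List Int) (end_2 : List Int) (end_3 : List Int) (size_1 : List Int) (size_2 : List Int) (size_3 : List Int) (out : List (List Int) × List (List Int) × List (List Int) × (List (Int × List Int))) : Prop := out = sort_start_end_alt start_1 start_2 start_3 end_1 end_2 end_3 size_1 size_2 size_3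
instance (start_1 : List Int) (start_2 : List Int) (start_3 : List Int) (end_1 : List Int) (end_2 : List Int) (end_3 : List Int) (size_1 : List Int) (size_2 : List Int) (size_3 : List Int) (out : List (List Int) × List (List Int) × List (List Int) × (List (Int × List Int))) : Decidable (Spec_sort_start_end start_1 start_2 start_3 end_1 end_2 end_3 size_1 size_2 size_3 out) := by unfold Spec_sort_start_end; infer_instance

-- ===== CLAIM (what is proved, stated in full; the proofs are below) =====
def Claim_equal_sort_start_end : Prop := ∀ (start_1 : List Int) (start_2 : List Int) (start_3 : List Int) (end_1 : List Int) (end_2 : List Int) (end_3 : List Int) (size_1 : List Int) (size_2 : List Int) (size_3 : List Int), Dom_sort_start_end start_1 start_2 start_3 end_1 end_2 end_3 size_1 size_2 size_3 → Pre_sort_start_end start_1 start_2 start_3 end_1 end_2 end_3 size_1 size_2 size_3 → Spec_sort_start_end start_1 start_2 start_3 end_1 end_2 end_3 size_1 size_2 size_3 (sort_start_end start_1 start_2 start_3 end_1 end_2 end_3 size_1 size_2 size_3)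

-- ===== LEMMAS AND PROOFS =====

-- the lexicographic order table, as a flatMap
def ordL (n1 n2 n3 : Nat) : List (List Int) :=
  (List.range n1).flatMap (fun (i : Nat) => (List.range n2).flatMap (fun (j : Nat) =>
    (List.range n3).map (fun (k : Nat) => ([(i : Int), (j : Int), (k : Int)] : List Int))))

theorem pyGetD_three1 (a b c d : Int) : PySem.List.pyGetD [a, b, c] 1 d = b := rfl
theorem pyGetD_three2 (a b c d : Int) : PySem.List.pyGetD [a, b, c] 2 d = c := rfl

theorem pySortList_eq (n1 n2 n3 : Nat) :
    pySortList (n1 : Int) (n2 : Int) (n3 : Int) = ordL n1 n2 n3 := by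
  unfold pySortList ordL
  simp only [PySem.List.pyRange_zero_nat, List.foldl_map,
    PySem.List.foldl_append_singleton_eq_map, PySem.List.foldl_append_eq_flatMap,
    List.nil_append]

-- A's scanning loop over range(len(order)) with order[i] indexing, characterised as maps over the suffix still to scan
theorem loopA_gen (f g h : List Int → List Int) :
    ∀ (post pre : List (List Int)) (sl el : List (List Int)) (la : List (Int × List Int)),
      (PySem.List.pyRange (pre.length : Int) (((pre ++ post).length : Nat) : Int) 1).foldl
        (fun (acc : List (List Int) × List (List Int) × List (Int × List Int)) i =>
          (acc.1 ++ [f (PySem.List.pyGetD (pre ++ post) i [])],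
           acc.2.1 ++ [g (PySem.List.pyGetD (pre ++ post) i [])],
           acc.2.2 ++ [(i, h (PySem.List.pyGetD (pre ++ post) i []))]))
        (sl, el, la)
      = (sl ++ post.map f, el ++ post.map g, la ++ PySem.List.enumerate (post.map h) pre.length) := by
  intro post
  induction post with
  | nil =>
    intro pre sl el la
    rw [PySem.List.pyRange_one_eq_nil (by simp)]
    simp
  | cons p ps ih =>
    intro pre sl el la
    rw [PySem.List.pyRange_one_cons (by exact_mod_cast (by simp : pre.length < (pre ++ p :: ps).length))]
    simp only [List.foldl_cons]
    have hget : PySem.List.pyGetD (pre ++ p :: ps) (pre.length : Int) [] = p := by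
      rw [PySem.List.pyGetD_natCast]
      simp [List.getD_eq_getElem?_getD]
    rw [hget]
    have h2 : ((pre.length : Int) + 1) = ((pre ++ [p]).length : Int) := by simp
    have h3 : (pre ++ p :: ps) = (pre ++ [p]) ++ ps := by simp
    rw [h2, h3]
    rw [ih (pre ++ [p]) (sl ++ [f p]) (el ++ [g p]) (la ++ [((pre.length : Int), h p)])]
    simp [PySem.List.enumerate_cons, List.append_assoc]

-- enumerate distributes over append, shifting the start index
theorem enum_append (xs ys : List (List Int)) (s : Int) :
    PySem.List.enumerate (xs ++ ys) s = PySem.List.enumerate xs s ++ PySem.List.enumerate ys (s + xs.length) := by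
  induction xs generalizing s with
  | nil => simp
  | cons x xs ih => simp [PySem.List.enumerate_cons, ih]; ring_nf

-- B's innermost loop: appends one element per component and advances idx by 1
theorem loopB3_gen (fo fs fe fz : Nat → List Int) :
    ∀ (ks : List Nat) (acc : List (List Int) × List (List Int) × List (List Int) × List (Int × List Int) × Int),
      ks.foldl (fun acc k =>
          (acc.1 ++ [fo k], acc.2.1 ++ [fs k], acc.2.2.1 ++ [fe k],
           acc.2.2.2.1 ++ [(acc.2.2.2.2, fz k)], acc.2.2.2.2 + 1)) acc
      = (acc.1 ++ ks.map fo, acc.2.1 ++ ks.map fs, acc.2.2.1 ++ ks.map fe,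
         acc.2.2.2.1 ++ PySem.List.enumerate (ks.map fz) acc.2.2.2.2,
         acc.2.2.2.2 + ks.length) := by
  intro ks
  induction ks with
  | nil => intro acc; simp
  | cons k ks ih =>
    intro acc
    simp only [List.foldl_cons, ih, List.map_cons, PySem.List.enumerate_cons, List.length_cons]
    simp [List.append_assoc]
    omega

-- B's two inner loops together, over arbitrary index lists
theorem loopB23_gen (fo fs fe fz : Nat → Nat → List Int) (ks : List Nat) :
    ∀ (js : List Nat) (acc : List (List Int) × List (List Int) × List (List Int) × List (Int × List Int) × Int),
      js.foldl (fun acc2 j => ks.foldl (fun acc3 k =>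
          (acc3.1 ++ [fo j k], acc3.2.1 ++ [fs j k], acc3.2.2.1 ++ [fe j k],
           acc3.2.2.2.1 ++ [(acc3.2.2.2.2, fz j k)], acc3.2.2.2.2 + 1)) acc2) acc
      = (acc.1 ++ js.flatMap (fun j => ks.map (fo j)),
         acc.2.1 ++ js.flatMap (fun j => ks.map (fs j)),
         acc.2.2.1 ++ js.flatMap (fun j => ks.map (fe j)),
         acc.2.2.2.1 ++ PySem.List.enumerate (js.flatMap (fun j => ks.map (fz j))) acc.2.2.2.2,
         acc.2.2.2.2 + (ks.length : Int) * (js.length : Int)) := by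
  intro js
  induction js with
  | nil => intro acc; simp
  | cons j js ih =>
    intro acc
    simp only [List.foldl_cons]
    rw [loopB3_gen]
    rw [ih]
    simp only [List.flatMap_cons, List.length_cons, enum_append, List.length_map]
    simp [List.append_assoc]
    ring

-- B's full triple loop, characterised as flatMaps over the index ranges
theorem loopB1 (s1 s2 s3 e1 e2 e3 z1 z2 z3 : List Int) :
    ∀ (is : List Nat) (acc : List (List Int) × List (List Int) × List (List Int) × List (Int × List Int) × Int),
      is.foldl (fun acc1 (i : Nat) =>
        (List.range s2.length).foldl (fun acc2 (j : Nat) =>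
          (List.range s3.length).foldl (fun acc3 (k : Nat) =>
            (acc3.1 ++ [[(i : Int), (j : Int), (k : Int)]],
             acc3.2.1 ++ [[s3.getD k 0, s2.getD j 0, s1.getD i 0]],
             acc3.2.2.1 ++ [[e3.getD k 0, e2.getD j 0, e1.getD i 0]],
             acc3.2.2.2.1 ++ [(acc3.2.2.2.2, [z3.getD k 0, z2.getD j 0, z1.getD i 0])],
             acc3.2.2.2.2 + 1)) acc2) acc1) acc
      = (acc.1 ++ is.flatMap (fun (i : Nat) => (List.range s2.length).flatMap (fun (j : Nat) =>
           (List.range s3.length).map (fun (k : Nat) => ([(i : Int), (j : Int), (k : Int)] : List Int)))),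
         acc.2.1 ++ is.flatMap (fun (i : Nat) => (List.range s2.length).flatMap (fun (j : Nat) =>
           (List.range s3.length).map (fun (k : Nat) => ([s3.getD k 0, s2.getD j 0, s1.getD i 0] : List Int)))),
         acc.2.2.1 ++ is.flatMap (fun (i : Nat) => (List.range s2.length).flatMap (fun (j : Nat) =>
           (List.range s3.length).map (fun (k : Nat) => ([e3.getD k 0, e2.getD j 0, e1.getD i 0] : List Int)))),
         acc.2.2.2.1 ++ PySem.List.enumerate (is.flatMap (fun (i : Nat) => (List.range s2.length).flatMap (fun (j : Nat) =>
           (List.range s3.length).map (fun (k : Nat) => ([z3.getD k 0, z2.getD j 0, z1.getD i 0] : List Int))))) acc.2.2.2.2,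
         acc.2.2.2.2 + ((s3.length : Int) * (s2.length : Int)) * is.length) := by
  intro is
  induction is with
  | nil => intro acc; simp
  | cons i is ih =>
    intro acc
    simp only [List.foldl_cons]
    rw [loopB23_gen]
    rw [ih]
    simp only [List.flatMap_cons, List.length_cons, enum_append, List.length_flatMap, List.length_map]
    simp [List.append_assoc, List.map_const']
    constructor
    · congr 1
      ring
    · ring

-- ===== VERDICT (by name: the statement is the Claim_ definition above) =====
theorem sort_start_end_spec : Claim_equal_sort_start_end := by
  intro s1 s2 s3 e1 e2 e3 z1 z2 z3 _ _
  unfold Spec_sort_start_end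
  have hA := loopA_gen
    (fun o => [PySem.List.pyGetD s3 (PySem.List.pyGetD o 2 0) 0,
               PySem.List.pyGetD s2 (PySem.List.pyGetD o 1 0) 0,
               PySem.List.pyGetD s1 (PySem.List.pyGetD o 0 0) 0])
    (fun o => [PySem.List.pyGetD e3 (PySem.List.pyGetD o 2 0) 0,
               PySem.List.pyGetD e2 (PySem.List.pyGetD o 1 0) 0,
               PySem.List.pyGetD e1 (PySem.List.pyGetD o 0 0) 0])
    (fun o => [PySem.List.pyGetD z3 (PySem.List.pyGetD o 2 0) 0,
               PySem.List.pyGetD z2 (PySem.List.pyGetD o 1 0) 0,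
               PySem.List.pyGetD z1 (PySem.List.pyGetD o 0 0) 0])
    (ordL s1.length s2.length s3.length) [] [] [] []
  simp only [List.nil_append, List.length_nil, Nat.cast_zero] at hA
  have hB := loopB1 s1 s2 s3 e1 e2 e3 z1 z2 z3 (List.range s1.length) ([], [], [], [], 0)
  simp only [List.nil_append] at hB
  simp only [sort_start_end, sort_start_end_alt, pySortList_eq]
  rw [hA, hB]
  simp only [ordL, List.map_flatMap, List.map_map]
  simp [Function.comp_def, pyGetD_three1, pyGetD_three2, PySem.List.pyGetD_natCast]
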